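-- pv_equiv track=rewrite | github.com/BedirT/pixel-magic | src/pixel_magic/workflow/tools.py | _effect_phase_hints
-- ===== SOURCE A (Python) =====
-- def _effect_phase_hints(frame_count: int) -> list[tuple[str, str]]:
--     """Build phase descriptions and occupancy hints for effect frame sequences."""
--     if frame_count <= 1:
--         return [("a readable top-down burst at peak intensity", "45-70%")]
--
--     hints: list[tuple[str, str]] = []
--     for index in range(frame_count):
--         if index == 0:
--             hints.append(("a compact orb, spark cluster, or rune burst just beginning to ignite", "20-35%"))
--         elif index == frame_count - 1:
--             hints.append(("a dissipating residue with broken fragments and trailing embers", "30-50%"))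
--         elif index <= frame_count // 2:
--             hints.append(("the burst expanding outward with strong directional motion and a clear focal core", "45-70%"))
--         else:
--             hints.append(("the effect cooling and breaking apart while staying clearly readable", "40-60%"))
--     return hints
-- ===== SOURCE B (Python) =====
-- def _effect_phase_hints(frame_count: int) -> list[tuple[str, str]]:
--     """Build phase descriptions and occupancy hints for effect frame sequences."""
--     if frame_count <= 1:
--         return [("a readable top-down burst at peak intensity", "45-70%")]
--     expanding = min(frame_count // 2, frame_count - 2)
--     cooling = frame_count - 2 - expanding
--     return (
--         [("a compact orb, spark cluster, or rune burst just beginning to ignite", "20-35%")]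
--         + [("the burst expanding outward with strong directional motion and a clear focal core", "45-70%")] * expanding
--         + [("the effect cooling and breaking apart while staying clearly readable", "40-60%")] * cooling
--         + [("a dissipating residue with broken fragments and trailing embers", "30-50%")]
--     )
-- ===== Notes on version B (the rewrite author's own statement) =====
-- stated objective: simpler
-- what changed: Replaces the per-index loop with a three-way branch test by computing the expanding and cooling segment lengths in closed form and building the result as a concatenation of replicated tuples.
import Mathlib
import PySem

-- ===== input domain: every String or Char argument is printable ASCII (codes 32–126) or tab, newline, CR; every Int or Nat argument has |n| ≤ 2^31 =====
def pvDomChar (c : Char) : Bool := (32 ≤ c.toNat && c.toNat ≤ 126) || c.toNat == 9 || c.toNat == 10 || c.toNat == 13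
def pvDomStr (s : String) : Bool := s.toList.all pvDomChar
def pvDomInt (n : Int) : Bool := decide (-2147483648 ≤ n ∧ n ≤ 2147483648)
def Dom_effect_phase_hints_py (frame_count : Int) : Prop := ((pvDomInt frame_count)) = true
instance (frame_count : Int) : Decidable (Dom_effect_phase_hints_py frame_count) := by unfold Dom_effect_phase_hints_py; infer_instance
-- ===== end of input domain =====

-- B is simpler: it computes the two interior segment lengths in closed form and builds the
-- list by concatenation of replicated tuples, instead of classifying each index in a loop.

-- The five phase tuples (shared string literals of both programs)
def pvPeak : String × String := ("a readable top-down burst at peak intensity", "45-70%")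
def pvIgnite : String × String := ("a compact orb, spark cluster, or rune burst just beginning to ignite", "20-35%")
def pvDissipate : String × String := ("a dissipating residue with broken fragments and trailing embers", "30-50%")
def pvExpand : String × String := ("the burst expanding outward with strong directional motion and a clear focal core", "45-70%")
def pvCool : String × String := ("the effect cooling and breaking apart while staying clearly readable", "40-60%")

-- ===== PORT A =====
def effect_phase_hints_py (frame_count : Int) : List (String × String) :=
  if frame_count ≤ 1 then [pvPeak]
  else
    (PySem.List.pyRange 0 frame_count 1).foldl
      (fun hints index =>
        if index = 0 then hints ++ [pvIgnite]
        else if index = frame_count - 1 then hints ++ [pvDissipate]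
        else if index ≤ PySem.Int.floordiv frame_count 2 then hints ++ [pvExpand]
        else hints ++ [pvCool]) []

-- ===== PORT B =====
def effect_phase_hints_py_alt (frame_count : Int) : List (String × String) :=
  if frame_count ≤ 1 then [pvPeak]
  else
    let expanding := min (PySem.Int.floordiv frame_count 2) (frame_count - 2)
    let cooling := frame_count - 2 - expanding
    [pvIgnite] ++ List.replicate expanding.toNat pvExpand
      ++ List.replicate cooling.toNat pvCool ++ [pvDissipate]

-- ===== PRECONDITION & SPEC =====
def Spec_effect_phase_hints_py (frame_count : Int) (out : List (String × String)) : Prop := out = effect_phase_hints_py_alt frame_count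
instance (frame_count : Int) (out : List (String × String)) : Decidable (Spec_effect_phase_hints_py frame_count out) := by unfold Spec_effect_phase_hints_py; infer_instance

-- ===== CLAIM (what is proved, stated in full; the proofs are below) =====
def Claim_equal_effect_phase_hints_py : Prop := ∀ (frame_count : Int), Dom_effect_phase_hints_py frame_count → Spec_effect_phase_hints_py frame_count (effect_phase_hints_py frame_count)

-- ===== LEMMAS AND PROOFS =====

-- A's per-index classification, as a pure function (used only by the proof)
def pvClassify (fc index : Int) : String × String :=
  if index = 0 then pvIgnite
  else if index = fc - 1 then pvDissipate
  else if index ≤ PySem.Int.floordiv fc 2 then pvExpand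
  else pvCool

-- ===== VERDICT (by name: the statement is the Claim_ definition above) =====
theorem effect_phase_hints_py_spec : Claim_equal_effect_phase_hints_py := by
  intro fc _
  unfold Spec_effect_phase_hints_py effect_phase_hints_py effect_phase_hints_py_alt
  by_cases h1 : fc ≤ 1
  · simp [h1]
  · simp only [h1, if_false]
    have hpos : (0:Int) < 2 := by norm_num
    have hq : PySem.Int.floordiv fc 2 = fc / 2 := PySem.Int.floordiv_eq_ediv_of_pos hpos
    set m : Int := min (PySem.Int.floordiv fc 2) (fc - 2) with hm
    have hm1 : m ≤ fc / 2 := by rw [hm, hq]; exact min_le_left _ _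
    have hm2 : m ≤ fc - 2 := by rw [hm]; exact min_le_right _ _
    have hm3 : fc / 2 ≤ m ∨ fc - 2 ≤ m := by
      rw [hm, hq]; rcases le_total (fc / 2) (fc - 2) with h | h
      · left; simp [min_eq_left h]
      · right; simp [min_eq_right h]
    have hfc : 2 ≤ fc := by omega
    have hm0 : 0 ≤ m := by omega
    -- turn the branch-appending loop into a map
    have hfun : (fun (hints : List (String × String)) index =>
        if index = 0 then hints ++ [pvIgnite]
        else if index = fc - 1 then hints ++ [pvDissipate]
        else if index ≤ PySem.Int.floordiv fc 2 then hints ++ [pvExpand]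
        else hints ++ [pvCool])
        = (fun hints index => hints ++ [pvClassify fc index]) := by
      funext acc i; unfold pvClassify; split_ifs <;> rfl
    rw [hfun, PySem.List.foldl_append_singleton_eq_map]
    -- split the range into the four phase segments
    rw [PySem.List.pyRange_one_append 0 1 fc (by omega) (by omega),
        PySem.List.pyRange_one_append 1 (m + 1) fc (by omega) (by omega),
        PySem.List.pyRange_one_append (m + 1) (fc - 1) fc (by omega) (by omega)]
    have hseg0 : PySem.List.pyRange 0 1 1 = [0] := by
      have := PySem.List.pyRange_one_singleton (a := (0:Int)); simpa using this
    have hseg3 : PySem.List.pyRange (fc - 1) fc 1 = [fc - 1] := by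
      have := PySem.List.pyRange_one_singleton (a := fc - 1)
      have h' : fc - 1 + 1 = fc := by omega
      rwa [h'] at this
    rw [hseg0, hseg3]
    simp only [List.map_append, List.map_cons, List.map_nil]
    have hc0 : pvClassify fc 0 = pvIgnite := by unfold pvClassify; simp
    have hc3 : pvClassify fc (fc - 1) = pvDissipate := by
      unfold pvClassify; rw [if_neg (by omega), if_pos rfl]
    have hc1 : (PySem.List.pyRange 1 (m + 1) 1).map (pvClassify fc)
        = List.replicate m.toNat pvExpand := by
      rw [List.map_congr_left (f := pvClassify fc) (g := fun _ => pvExpand) ?_]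
      · rw [List.map_const', PySem.List.length_pyRange_one]
        congr 1; omega
      · intro i hi
        rw [PySem.List.mem_pyRange_one] at hi
        unfold pvClassify
        rw [if_neg (by omega), if_neg (by omega), if_pos (by rw [hq]; omega)]
    have hc2 : (PySem.List.pyRange (m + 1) (fc - 1) 1).map (pvClassify fc)
        = List.replicate (fc - 2 - m).toNat pvCool := by
      rw [List.map_congr_left (f := pvClassify fc) (g := fun _ => pvCool) ?_]
      · rw [List.map_const', PySem.List.length_pyRange_one]
        congr 1; omega
      · intro i hi
        rw [PySem.List.mem_pyRange_one] at hi
        unfold pvClassify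
        rw [if_neg (by omega), if_neg (by omega), if_neg (by rw [hq]; omega)]
    rw [hc0, hc3, hc1, hc2]
    simp
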